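-- pv_equiv track=rewrite | github.com/moaqz/adventjs | 2024/20.py | fix_gift_list
-- ===== SOURCE A (Python) =====
-- def fix_gift_list(received: list[str], expected: list[str]) -> dict[str, int]:
--     missing_items = {}
--     extra_items = {}
--     all_items = set(received) | set(expected)
--
--     for item in all_items:
--         expected_items = expected.count(item)
--         received_items = received.count(item)
--
--         if received_items < expected_items:
--             missing_items[item] = abs(expected_items - received_items)
--         elif received_items > expected_items:
--             extra_items[item] = abs(expected_items - received_items)
--
--     return {"missing": missing_items, "extra": extra_items}
-- ===== SOURCE B (Python) =====
-- def fix_gift_list(received: list[str], expected: list[str]) -> dict[str, int]: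
--     # Worklist cancellation: repeatedly take the first remaining item, settle its
--     # surplus by sign, and strip every occurrence of it from BOTH lists, so the
--     # problem shrinks each round; no set union, no .count over the full lists.
--     missing, extra = {}, {}
--     r, e = received, expected
--     while r or e:
--         k = r[0] if r else e[0]
--         d = sum(1 for x in e if x == k) - sum(1 for x in r if x == k)
--         if d > 0:
--             missing[k] = d
--         elif d < 0:
--             extra[k] = -d
--         r = [x for x in r if x != k]
--         e = [x for x in e if x != k]
--     return {"missing": missing, "extra": extra}
-- ===== Notes on version B (the rewrite author's own statement) =====
-- stated objective: alternative
-- what changed: A builds a set union of both lists and, for each item of that set, rescans both full lists with .count(); B never builds a set or counts over the full lists: a worklist loop repeatedly takes the first remaining item, settles its surplus by sign, and strips all of its occurrences from both shrinking lists until nothing is left.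
import Mathlib
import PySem

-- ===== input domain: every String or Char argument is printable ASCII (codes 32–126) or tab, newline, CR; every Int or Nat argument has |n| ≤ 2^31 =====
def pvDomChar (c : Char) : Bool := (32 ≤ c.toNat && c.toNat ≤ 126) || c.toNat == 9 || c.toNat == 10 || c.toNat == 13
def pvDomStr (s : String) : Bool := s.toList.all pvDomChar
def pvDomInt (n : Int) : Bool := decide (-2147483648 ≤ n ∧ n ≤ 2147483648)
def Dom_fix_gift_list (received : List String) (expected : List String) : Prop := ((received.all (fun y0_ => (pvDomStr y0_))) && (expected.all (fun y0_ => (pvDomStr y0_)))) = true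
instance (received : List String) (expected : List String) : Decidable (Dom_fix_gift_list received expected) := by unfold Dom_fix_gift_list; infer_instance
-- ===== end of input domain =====

-- B replaces A's set-union plus per-item .count() rescans by a worklist loop that
-- strips each settled item from both shrinking lists (alternative decomposition).


-- ===== PORT A =====
-- set(received) | set(expected); the loop keeps two dict accumulators; abs(e-r) is |e-r|.
-- (Python's set iteration order is hash order, not modelled; the returned dicts are
-- compared ignoring order, so iterating the Set in first-insertion order is exact.)
def fix_gift_list (received : List String) (expected : List String) : List (String × List (String × Int)) :=
  let all_items : PySem.Set String := PySem.Set.union (PySem.Set.ofList received) expected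
  let st := all_items.foldl
    (fun (st : PySem.Dict String Int × PySem.Dict String Int) item =>
      let expected_items : Int := (expected.count item : Int)
      let received_items : Int := (received.count item : Int)
      if received_items < expected_items then
        (st.1.insert item |expected_items - received_items|, st.2)
      else if received_items > expected_items then
        (st.1, st.2.insert item |expected_items - received_items|)
      else st)
    (PySem.Dict.empty, PySem.Dict.empty)
  [("missing", st.1.items), ("extra", st.2.items)]

-- ===== PORT B =====
-- the while loop over the shrinking pair (r, e): k = r[0] if r else e[0];
-- d = sum(1 for x in e if x == k) - sum(1 for x in r if x == k); settle k by the
-- sign of d; r, e = [x for x in r if x != k], [x for x in e if x != k]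
-- fuel = r.length + e.length only makes the recursion total; with enough fuel it is
-- exactly the while loop (each round strips the settled key from both lists)
def fglAltGo (fuel : Nat) (r e : List String) (missing extra : PySem.Dict String Int) :
    PySem.Dict String Int × PySem.Dict String Int :=
  match fuel with
  | 0 => (missing, extra)
  | fuel + 1 =>
    match r, e with
    | [], [] => (missing, extra)
    | _, _ =>
      let k := match r with | k :: _ => k | [] => e.headD ""
      let d : Int := ((e.filter (fun x => x == k)).length : Int)
        - ((r.filter (fun x => x == k)).length : Int)
      let st := if 0 < d then (missing.insert k d, extra)
        else if d < 0 then (missing, extra.insert k (-d)) else (missing, extra)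
      fglAltGo fuel (r.filter (fun x => x != k)) (e.filter (fun x => x != k)) st.1 st.2

def fix_gift_list_alt (received : List String) (expected : List String) : List (String × List (String × Int)) :=
  let st := fglAltGo (received.length + expected.length) received expected PySem.Dict.empty PySem.Dict.empty
  [("missing", st.1.items), ("extra", st.2.items)]

-- ===== PRECONDITION & SPEC =====
def Spec_fix_gift_list (received : List String) (expected : List String) (out : List (String × List (String × Int))) : Prop := out = fix_gift_list_alt received expected
instance (received : List String) (expected : List String) (out : List (String × List (String × Int))) : Decidable (Spec_fix_gift_list received expected out) := by unfold Spec_fix_gift_list; infer_instance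

-- ===== CLAIM (what is proved, stated in full; the proofs are below) =====
def Claim_equal_fix_gift_list : Prop := ∀ (received : List String) (expected : List String), Dom_fix_gift_list received expected → Spec_fix_gift_list received expected (fix_gift_list received expected)

-- ===== LEMMAS AND PROOFS =====

-- A's fold body over fixed lists r, e (named so the proofs can speak about it)
def fglStep (r e : List String) (st : PySem.Dict String Int × PySem.Dict String Int) (item : String) :
    PySem.Dict String Int × PySem.Dict String Int :=
  let expected_items : Int := (e.count item : Int)
  let received_items : Int := (r.count item : Int)
  if received_items < expected_items then
    (st.1.insert item |expected_items - received_items|, st.2)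
  else if received_items > expected_items then
    (st.1, st.2.insert item |expected_items - received_items|)
  else st

theorem ofList_filter {α : Type} [BEq α] [LawfulBEq α] (p : α → Bool) (xs : List α) :
    PySem.Set.ofList (xs.filter p) = (PySem.Set.ofList xs).filter p := by
  induction xs with
  | nil => rfl
  | cons x t ih =>
    by_cases hp : p x = true
    · rw [List.filter_cons_of_pos hp, PySem.Set.ofList_cons, PySem.Set.ofList_cons, ih,
        List.filter_cons_of_pos hp]
      simp only [PySem.Set.discard, List.filter_filter]
      congr 1
      exact List.filter_congr (fun a _ => by rw [Bool.and_comm])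
    · rw [List.filter_cons_of_neg hp, PySem.Set.ofList_cons, ih]
      simp only [PySem.Set.discard, List.filter_cons_of_neg hp, List.filter_filter]
      exact List.filter_congr (fun a _ => by
        by_cases h : a = x
        · subst h; simp [hp]
        · simp [h])

-- the two boolean tests B uses are the same predicate
theorem bne_eq_not_beq (k : String) : (fun x : String => x != k) = (fun x => !x == k) := by
  funext x; rfl

-- peeling the first worklist key off A's union of the two remaining lists
theorem union_peel_cons (k : String) (rt e : List String) :
    PySem.Set.union (PySem.Set.ofList (k :: rt)) e
      = k :: PySem.Set.union (PySem.Set.ofList ((k :: rt).filter (fun x => x != k)))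
          (e.filter (fun x => x != k)) := by
  rw [PySem.Set.union, PySem.Set.union, PySem.Set.update_eq_append_filter,
    PySem.Set.update_eq_append_filter, PySem.Set.ofList_cons]
  have hfr : (k :: rt).filter (fun x => x != k) = rt.filter (fun x => x != k) := by simp
  rw [hfr, ofList_filter, bne_eq_not_beq]
  show k :: (PySem.Set.ofList rt).discard k ++ _ = _
  rw [PySem.Set.discard]
  simp only [List.cons_append, List.cons.injEq, true_and]
  congr 1
  rw [ofList_filter (fun y => !y == k) e, List.filter_filter]
  apply List.filter_congr
  intro a _
  simp only [PySem.Set.contains, List.contains_cons]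
  by_cases h : a = k
  · subst h; simp
  · have hak : (a == k) = false := by simp [h]
    simp [hak, Bool.and_comm]

theorem union_peel_nil (k : String) (et : List String) :
    PySem.Set.union (PySem.Set.ofList ([] : List String)) (k :: et)
      = k :: PySem.Set.union (PySem.Set.ofList (([] : List String).filter (fun x => x != k)))
          ((k :: et).filter (fun x => x != k)) := by
  rw [PySem.Set.union, PySem.Set.union]
  show PySem.Set.update [] (k :: et) = k :: PySem.Set.update [] ((k :: et).filter (fun x => x != k))
  rw [PySem.Set.update_nil_left, PySem.Set.update_nil_left, PySem.Set.ofList_cons]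
  have : (k :: et).filter (fun x => x != k) = et.filter (fun x => x != k) := by simp
  rw [this, ofList_filter, bne_eq_not_beq, PySem.Set.discard]

-- counts survive stripping a different key
theorem count_filter_ne {k a : String} {l : List String} (h : a ≠ k) :
    (l.filter (fun x => x != k)).count a = l.count a :=
  List.count_filter (by simp [h])

-- one settlement round of B equals one application of A's fold body
theorem step_eq (r e : List String) (m x : PySem.Dict String Int) (k : String) :
    (if 0 < ((e.filter (fun y => y == k)).length : Int) - ((r.filter (fun y => y == k)).length : Int)
      then (m.insert k (((e.filter (fun y => y == k)).length : Int) - ((r.filter (fun y => y == k)).length : Int)), x)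
      else if ((e.filter (fun y => y == k)).length : Int) - ((r.filter (fun y => y == k)).length : Int) < 0
        then (m, x.insert k (-(((e.filter (fun y => y == k)).length : Int) - ((r.filter (fun y => y == k)).length : Int))))
        else (m, x))
      = fglStep r e (m, x) k := by
  have hce : ((e.filter (fun y => y == k)).length : Int) = (e.count k : Int) := by
    rw [List.count_eq_countP, List.countP_eq_length_filter]
  have hcr : ((r.filter (fun y => y == k)).length : Int) = (r.count k : Int) := by
    rw [List.count_eq_countP, List.countP_eq_length_filter]
  rw [hce, hcr, fglStep]
  simp only [gt_iff_lt]
  rcases lt_trichotomy ((r.count k : Int)) ((e.count k : Int)) with h | h | h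
  · rw [if_pos (by omega), if_pos h, abs_of_pos (by omega)]
  · rw [if_neg (by omega), if_neg (by omega), if_neg (by omega), if_neg (by omega)]
  · rw [if_neg (by omega), if_pos (by omega), if_neg (by omega), if_pos h, abs_of_neg (by omega)]

-- one-step unfoldings of the fuel recursion (definitional)
theorem fglAltGo_cons (fuel : Nat) (k : String) (rt e : List String) (m x : PySem.Dict String Int) :
    fglAltGo (fuel + 1) (k :: rt) e m x
      = fglAltGo fuel ((k :: rt).filter (fun y => y != k)) (e.filter (fun y => y != k))
          (if 0 < ((e.filter (fun y => y == k)).length : Int) - (((k :: rt).filter (fun y => y == k)).length : Int)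
            then (m.insert k (((e.filter (fun y => y == k)).length : Int) - (((k :: rt).filter (fun y => y == k)).length : Int)), x)
            else if ((e.filter (fun y => y == k)).length : Int) - (((k :: rt).filter (fun y => y == k)).length : Int) < 0
              then (m, x.insert k (-(((e.filter (fun y => y == k)).length : Int) - (((k :: rt).filter (fun y => y == k)).length : Int))))
              else (m, x)).1
          (if 0 < ((e.filter (fun y => y == k)).length : Int) - (((k :: rt).filter (fun y => y == k)).length : Int)
            then (m.insert k (((e.filter (fun y => y == k)).length : Int) - (((k :: rt).filter (fun y => y == k)).length : Int)), x)
            else if ((e.filter (fun y => y == k)).length : Int) - (((k :: rt).filter (fun y => y == k)).length : Int) < 0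
              then (m, x.insert k (-(((e.filter (fun y => y == k)).length : Int) - (((k :: rt).filter (fun y => y == k)).length : Int))))
              else (m, x)).2 := rfl

theorem fglAltGo_nil_cons (fuel : Nat) (k : String) (et : List String) (m x : PySem.Dict String Int) :
    fglAltGo (fuel + 1) [] (k :: et) m x
      = fglAltGo fuel (([] : List String).filter (fun y => y != k)) ((k :: et).filter (fun y => y != k))
          (if 0 < (((k :: et).filter (fun y => y == k)).length : Int) - ((([] : List String).filter (fun y => y == k)).length : Int)
            then (m.insert k ((((k :: et).filter (fun y => y == k)).length : Int) - ((([] : List String).filter (fun y => y == k)).length : Int)), x)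
            else if (((k :: et).filter (fun y => y == k)).length : Int) - ((([] : List String).filter (fun y => y == k)).length : Int) < 0
              then (m, x.insert k (-((((k :: et).filter (fun y => y == k)).length : Int) - ((([] : List String).filter (fun y => y == k)).length : Int))))
              else (m, x)).1
          (if 0 < (((k :: et).filter (fun y => y == k)).length : Int) - ((([] : List String).filter (fun y => y == k)).length : Int)
            then (m.insert k ((((k :: et).filter (fun y => y == k)).length : Int) - ((([] : List String).filter (fun y => y == k)).length : Int)), x)
            else if (((k :: et).filter (fun y => y == k)).length : Int) - ((([] : List String).filter (fun y => y == k)).length : Int) < 0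
              then (m, x.insert k (-((((k :: et).filter (fun y => y == k)).length : Int) - ((([] : List String).filter (fun y => y == k)).length : Int))))
              else (m, x)).2 := rfl

-- the worklist loop equals A's fold over the union of the remaining lists
theorem fglAltGo_eq_foldl : ∀ fuel r e m x, r.length + e.length ≤ fuel →
    fglAltGo fuel r e m x
      = (PySem.Set.union (PySem.Set.ofList r) e).foldl (fglStep r e) (m, x) := by
  intro fuel
  induction fuel with
  | zero =>
    intro r e m x h
    have hr : r = [] := List.eq_nil_of_length_eq_zero (by omega)
    have he : e = [] := List.eq_nil_of_length_eq_zero (by omega)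
    subst hr; subst he; rfl
  | succ fuel ih =>
    intro r e m x h
    rcases r with _ | ⟨k, rt⟩
    · rcases e with _ | ⟨k, et⟩
      · rfl
      · -- r = [], e = k :: et
        rw [union_peel_nil, List.foldl_cons, fglAltGo_nil_cons, step_eq [] (k :: et) m x k]
        have hlt : (([] : List String).filter (fun x => x != k)).length
            + ((k :: et).filter (fun x => x != k)).length ≤ fuel := by
          have h1 : ((k :: et).filter (fun x => x != k)).length < (k :: et).length :=
            List.length_filter_lt_length_iff_exists.mpr ⟨k, by simp, by simp⟩
          simp only [List.filter_nil, List.length_nil] at *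
          omega
        rw [ih _ _ _ _ hlt]
        have heta : ((fglStep [] (k :: et) (m, x) k).1, (fglStep [] (k :: et) (m, x) k).2)
            = fglStep [] (k :: et) (m, x) k := rfl
        rw [heta]
        apply PySem.List.foldl_congr_mem
        intro acc a ha
        have hane : a ≠ k := by
          rcases (PySem.Set.mem_union _ _ _).mp ha with h' | h'
          · rw [PySem.Set.mem_ofList] at h'; simp at h'
          · exact (List.mem_filter.mp h').2 |> bne_iff_ne.mp
        rw [fglStep, fglStep]
        simp only [List.filter_nil, count_filter_ne hane]
    · -- r = k :: rt
      rw [union_peel_cons, List.foldl_cons, fglAltGo_cons, step_eq (k :: rt) e m x k]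
      have hlt : ((k :: rt).filter (fun x => x != k)).length
          + (e.filter (fun x => x != k)).length ≤ fuel := by
        have h1 : ((k :: rt).filter (fun x => x != k)).length < (k :: rt).length :=
          List.length_filter_lt_length_iff_exists.mpr ⟨k, by simp, by simp⟩
        have h2 : (e.filter (fun x => x != k)).length ≤ e.length := List.length_filter_le _ _
        simp only [List.length_cons] at *
        omega
      rw [ih _ _ _ _ hlt]
      have heta : ((fglStep (k :: rt) e (m, x) k).1, (fglStep (k :: rt) e (m, x) k).2)
          = fglStep (k :: rt) e (m, x) k := rfl
      rw [heta]
      apply PySem.List.foldl_congr_mem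
      intro acc a ha
      have hane : a ≠ k := by
        rcases (PySem.Set.mem_union _ _ _).mp ha with h' | h'
        · rw [PySem.Set.mem_ofList] at h'
          exact (List.mem_filter.mp h').2 |> bne_iff_ne.mp
        · exact (List.mem_filter.mp h').2 |> bne_iff_ne.mp
      rw [fglStep, fglStep]
      simp only [count_filter_ne hane]

-- ===== VERDICT (by name: the statement is the Claim_ definition above) =====
theorem fix_gift_list_spec : Claim_equal_fix_gift_list := by
  intro received expected _
  unfold Spec_fix_gift_list fix_gift_list fix_gift_list_alt
  rw [fglAltGo_eq_foldl (received.length + expected.length) received expected _ _ le_rfl]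
  rfl
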